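-- pv_equiv track=rewrite | github.com/b-ciq/brand-assets-ecosystem | interfaces/mcp-server/cli_wrapper.py | resolve_product_from_query
-- ===== SOURCE A (Python) =====
-- from typing import Optional, Dict, Any, List
--
-- def resolve_product_from_query(query: str, patterns: Dict) -> Optional[str]:
--     """Resolve a query to actual product name using patterns"""
--     if not patterns or 'product_patterns' not in patterns:
--         return None
--
--     query_lower = query.lower().strip()
--
--     # Direct product name match
--     if query_lower in patterns['product_patterns']:
--         return query_lower
--
--     # Pattern matching
--     for product, aliases in patterns['product_patterns'].items():
--         if query_lower in [alias.lower() for alias in aliases]: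
--             return product
--
--     return None
-- ===== SOURCE B (Python) =====
-- from typing import Optional, Dict
--
--
-- def resolve_product_from_query(query: str, patterns: Dict) -> Optional[str]:
--     """Resolve a query to actual product name via a reverse alias index."""
--     if not patterns or 'product_patterns' not in patterns:
--         return None
--
--     query_lower = query.lower().strip()
--     products = patterns['product_patterns']
--
--     # Direct product name match
--     if query_lower in products:
--         return query_lower
--
--     # Reverse index: lowered alias -> product; first product wins on duplicates
--     index = {}
--     for product, aliases in products.items():
--         for alias in aliases:
--             index.setdefault(alias.lower(), product)
--     return index.get(query_lower)
-- ===== Notes on version B (the rewrite author's own statement) =====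
-- stated objective: idiomatic
-- what changed: Replaces the per-product list-membership scan (which rebuilds each product's lowered alias list) with a reverse index dict built once via setdefault (first product wins) followed by a single lookup.
import Mathlib
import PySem

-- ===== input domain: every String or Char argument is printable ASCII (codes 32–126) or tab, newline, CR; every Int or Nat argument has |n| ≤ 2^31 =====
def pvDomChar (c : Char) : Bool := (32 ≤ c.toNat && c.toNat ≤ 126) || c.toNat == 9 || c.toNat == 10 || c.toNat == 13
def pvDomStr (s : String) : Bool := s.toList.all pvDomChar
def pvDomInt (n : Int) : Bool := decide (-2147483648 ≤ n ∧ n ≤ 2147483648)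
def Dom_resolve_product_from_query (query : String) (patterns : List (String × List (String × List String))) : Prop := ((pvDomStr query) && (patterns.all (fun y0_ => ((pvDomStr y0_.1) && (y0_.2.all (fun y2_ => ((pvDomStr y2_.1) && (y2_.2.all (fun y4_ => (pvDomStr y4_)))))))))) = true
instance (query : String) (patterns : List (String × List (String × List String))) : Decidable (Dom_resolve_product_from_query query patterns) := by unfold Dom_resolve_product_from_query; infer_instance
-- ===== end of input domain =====

-- B replaces A's per-product membership scan over freshly lowered alias lists by a reverse
-- index dict (lowered alias -> product, first product wins) built once, then one lookup (idiomatic).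

-- ===== PORT A =====
-- the 'for product, aliases in …' loop with its 'query_lower in [alias.lower() …]' test
def pvScan (ql : String) : List (String × List String) → Option String
  | [] => none
  | (product, aliases) :: rest =>
    if ql ∈ aliases.map PySem.Str.lower then some product else pvScan ql rest

def resolve_product_from_query (query : String) (patterns : List (String × List (String × List String))) : Option String :=
  if patterns.isEmpty then none
  else
    match patterns.lookup "product_patterns" with
    | none => none
    | some pp =>
      let ql := PySem.Str.strip (PySem.Str.lower query)
      if (pp.lookup ql).isSome then some ql
      else pvScan ql pp

-- ===== PORT B =====
-- the inner 'for alias in aliases: index.setdefault(alias.lower(), product)' loop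
def pvAddAliases (product : String) (idx : PySem.Dict String String) (aliases : List String) : PySem.Dict String String :=
  aliases.foldl (fun idx al => idx.setdefault (PySem.Str.lower al) product) idx

-- the 'for product, aliases in products.items(): …' loop building the reverse index
def pvBuildIndex (pp : List (String × List String)) : PySem.Dict String String :=
  pp.foldl (fun idx p => pvAddAliases p.1 idx p.2) PySem.Dict.empty

def resolve_product_from_query_alt (query : String) (patterns : List (String × List (String × List String))) : Option String :=
  if patterns.isEmpty then none
  else
    match patterns.lookup "product_patterns" with
    | none => none
    | some pp =>
      let ql := PySem.Str.strip (PySem.Str.lower query)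
      if (pp.lookup ql).isSome then some ql
      else (pvBuildIndex pp).get? ql

-- ===== PRECONDITION & SPEC =====
def Spec_resolve_product_from_query (query : String) (patterns : List (String × List (String × List String))) (out : Option String) : Prop := out = resolve_product_from_query_alt query patterns
instance (query : String) (patterns : List (String × List (String × List String))) (out : Option String) : Decidable (Spec_resolve_product_from_query query patterns out) := by unfold Spec_resolve_product_from_query; infer_instance

-- ===== CLAIM (what is proved, stated in full; the proofs are below) =====
def Claim_equal_resolve_product_from_query : Prop := ∀ (query : String) (patterns : List (String × List (String × List String))), Dom_resolve_product_from_query query patterns → Spec_resolve_product_from_query query patterns (resolve_product_from_query query patterns)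

-- ===== LEMMAS AND PROOFS =====

theorem pvGet?_addAliases (product ql : String) (idx : PySem.Dict String String) (aliases : List String) :
    (pvAddAliases product idx aliases).get? ql =
      (idx.get? ql).or (if ql ∈ aliases.map PySem.Str.lower then some product else none) := by
  induction aliases generalizing idx with
  | nil => simp [pvAddAliases]
  | cons a rest ih =>
    simp only [pvAddAliases, List.foldl_cons] at *
    rw [ih]
    by_cases h : ql = PySem.Str.lower a
    · rw [h, PySem.Dict.get?_setdefault_self]
      cases idx.get? (PySem.Str.lower a) <;> simp
    · rw [PySem.Dict.get?_setdefault_of_ne _ _ h]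
      simp [h]

theorem pvGet?_foldIndex (ql : String) (pp : List (String × List String)) (d : PySem.Dict String String) :
    (pp.foldl (fun idx p => pvAddAliases p.1 idx p.2) d).get? ql = (d.get? ql).or (pvScan ql pp) := by
  induction pp generalizing d with
  | nil => simp [pvScan]
  | cons p rest ih =>
    simp only [List.foldl_cons]
    rw [ih, pvGet?_addAliases, Option.or_assoc, pvScan]
    obtain ⟨product, aliases⟩ := p
    split <;> simp

theorem pvGet?_buildIndex (ql : String) (pp : List (String × List String)) :
    (pvBuildIndex pp).get? ql = pvScan ql pp := by
  rw [pvBuildIndex, pvGet?_foldIndex]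
  simp

-- ===== VERDICT (by name: the statement is the Claim_ definition above) =====
theorem resolve_product_from_query_spec : Claim_equal_resolve_product_from_query := by
  intro query patterns _
  unfold Spec_resolve_product_from_query resolve_product_from_query resolve_product_from_query_alt
  split
  · rfl
  · cases patterns.lookup "product_patterns" with
    | none => rfl
    | some pp =>
      simp only
      split
      · rfl
      · exact (pvGet?_buildIndex _ pp).symm
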